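-- pv_equiv track=rewrite | github.com/Ascendral/KlomboAGI | klomboagi/reasoning/arc_transform.py | _shift_by_col
-- ===== SOURCE A (Python) =====
-- def _shift_by_col(g, bg):
--     """Each column cyclically shifted down by its column index."""
--     R,C=len(g),len(g[0]); result=[[0]*C for _ in range(R)]
--     for c in range(C):
--         col=[g[r][c] for r in range(R)]
--         s=c%R
--         shifted=col[s:]+col[:s]
--         for r in range(R): result[r][c]=shifted[r]
--     return result
-- ===== SOURCE B (Python) =====
-- def _shift_by_col(g, bg):
--     """Each column cyclically shifted down by its column index."""
--     R, C = len(g), len(g[0])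
--     return [[g[(r + c) % R][c] for c in range(C)] for r in range(R)]
-- ===== Notes on version B (the rewrite author's own statement) =====
-- stated objective: simpler
-- what changed: B computes each output cell directly as g[(r+c)%R][c] in one row-major comprehension, eliminating A's zero-initialized result matrix, per-column extraction, slice-based rotation and cell-by-cell write-back.
import Mathlib
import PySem

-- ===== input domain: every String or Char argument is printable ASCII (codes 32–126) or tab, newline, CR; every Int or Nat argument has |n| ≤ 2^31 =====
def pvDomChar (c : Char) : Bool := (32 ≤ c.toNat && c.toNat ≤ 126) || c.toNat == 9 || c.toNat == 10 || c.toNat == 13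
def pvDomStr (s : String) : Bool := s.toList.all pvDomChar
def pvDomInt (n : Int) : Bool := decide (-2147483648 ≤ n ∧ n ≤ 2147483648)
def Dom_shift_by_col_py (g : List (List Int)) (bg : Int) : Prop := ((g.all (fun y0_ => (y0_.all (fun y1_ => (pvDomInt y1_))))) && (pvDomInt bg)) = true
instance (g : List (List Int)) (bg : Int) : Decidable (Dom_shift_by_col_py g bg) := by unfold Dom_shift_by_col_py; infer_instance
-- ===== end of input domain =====

-- B replaces A's zero-filled result matrix, per-column extraction, slice rotation and
-- cell-by-cell write-back by one direct comprehension result[r][c] = g[(r+c)%R][c] (simpler).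

-- ===== PORT A =====
-- Indexing notes (exact on Pre_ inputs): g[0] → g.headD []  (g nonempty under Pre_);
-- g[r][c], shifted[r] with 0 ≤ index < length → List.getD; col[s:]+col[:s] with 0 ≤ s < R → drop/take;
-- result[r][c] = v → List.set.
def shift_by_col_py (g : List (List Int)) (bg : Int) : List (List Int) :=
  let R := g.length
  let C := (g.headD []).length
  let result := List.replicate R (List.replicate C (0 : Int))
  (List.range C).foldl (fun result c =>
    let col := (List.range R).map (fun r => (g.getD r []).getD c 0)
    let s := c % R
    let shifted := col.drop s ++ col.take s
    (List.range R).foldl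
      (fun res r => res.set r ((res.getD r []).set c (shifted.getD r 0))) result) result

-- ===== PORT B =====
def shift_by_col_py_alt (g : List (List Int)) (bg : Int) : List (List Int) :=
  let R := g.length
  let C := (g.headD []).length
  (List.range R).map (fun r => (List.range C).map (fun c => (g.getD ((r + c) % R) []).getD c 0))

-- ===== PRECONDITION & SPEC =====
-- Pre_ excludes exactly the inputs where the Python A raises IndexError: the empty grid
-- (g[0]) and ragged grids with a row shorter than row 0 (g[r][c] on that row); B raises there too.
def Pre_shift_by_col_py (g : List (List Int)) (bg : Int) : Prop :=
  g ≠ [] ∧ ∀ row ∈ g, (g.headD []).length ≤ row.length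
instance (g : List (List Int)) (bg : Int) : Decidable (Pre_shift_by_col_py g bg) := by
  unfold Pre_shift_by_col_py; infer_instance
def pvWitness_shift_by_col_py : List (List Int) × Int := ([[1, 2], [3, 4]], 0)

def Spec_shift_by_col_py (g : List (List Int)) (bg : Int) (out : List (List Int)) : Prop := out = shift_by_col_py_alt g bg
instance (g : List (List Int)) (bg : Int) (out : List (List Int)) : Decidable (Spec_shift_by_col_py g bg out) := by unfold Spec_shift_by_col_py; infer_instance

-- ===== CLAIM (what is proved, stated in full; the proofs are below) =====
def Claim_equal_shift_by_col_py : Prop := ∀ (g : List (List Int)) (bg : Int), Dom_shift_by_col_py g bg → Pre_shift_by_col_py g bg → Spec_shift_by_col_py g bg (shift_by_col_py g bg)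

-- ===== LEMMAS AND PROOFS =====

-- setting index n of a map over range R stays a map over range R
theorem pv_set_map_range {α : Type} (R n : Nat) (h : Nat → α) (x : α) (hn : n < R) :
    ((List.range R).map h).set n x = (List.range R).map (fun r => if r = n then x else h r) := by
  apply List.ext_getElem
  · simp
  · intro i hi _
    simp only [List.getElem_set, List.getElem_map, List.getElem_range]
    by_cases h' : i = n
    · simp [h']
    · rw [if_neg (Ne.symm h'), if_neg h']

theorem pv_getD_map_range {α : Type} (R n : Nat) (h : Nat → α) (d : α) (hn : n < R) :
    ((List.range R).map h).getD n d = h n := by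
  rw [List.getD_eq_getElem _ _ (by simpa using hn)]
  simp

-- the inner write-back loop turns a map-over-range into a map-over-range
theorem pv_inner_fold {α : Type} [Inhabited α] (R k : Nat) (row : Nat → List α) (v : Nat → α)
    (n : Nat) (hn : n ≤ R) :
    (List.range n).foldl (fun res r => res.set r ((res.getD r []).set k (v r)))
        ((List.range R).map row)
      = (List.range R).map (fun r => if r < n then (row r).set k (v r) else row r) := by
  induction n with
  | zero => simp
  | succ m ih =>
      rw [List.range_succ, List.foldl_append, ih (by omega)]
      simp only [List.foldl_cons, List.foldl_nil]
      rw [pv_getD_map_range R m _ [] (by omega), if_neg (lt_irrefl m),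
          pv_set_map_range R m _ _ (by omega)]
      apply List.map_congr_left
      intro i _
      by_cases h1 : i = m
      · subst h1; simp
      · by_cases h2 : i < m
        · rw [if_neg h1, if_pos h2, if_pos (by omega)]
        · rw [if_neg h1, if_neg h2, if_neg (by omega)]

-- the rotated column read at r is the column read at (r+c) mod R
theorem pv_shifted_getD (g : List (List Int)) (c R : Nat) (hR : R = g.length) (hR0 : 0 < R)
    (r : Nat) (hr : r < R) :
    (((List.range R).map (fun r => (g.getD r []).getD c 0)).drop (c % R) ++
       ((List.range R).map (fun r => (g.getD r []).getD c 0)).take (c % R)).getD r 0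
      = (g.getD ((r + c) % R) []).getD c 0 := by
  set col := (List.range R).map (fun r => (g.getD r []).getD c 0) with hcol
  have hlen : col.length = R := by simp [hcol]
  set s := c % R with hs
  have hsR : s < R := Nat.mod_lt _ hR0
  have hget : ∀ (i : Nat) (h : i < col.length), col[i] = (g.getD i []).getD c 0 := by
    intro i h
    simp only [hcol, List.getElem_map, List.getElem_range]
  have hmod : (r + s) % R = (r + c) % R := by rw [hs, Nat.add_mod_mod]
  rw [← hmod]
  rw [List.getD_eq_getElem _ _ (by simp [hlen]; omega)]
  by_cases hcase : r < R - s
  · rw [List.getElem_append_left (by simp [hlen]; omega), List.getElem_drop, hget]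
    have : (r + s) % R = s + r := by rw [Nat.mod_eq_of_lt (by omega)]; omega
    rw [this]
  · rw [List.getElem_append_right (by simp [hlen]; omega), List.getElem_take, hget]
    have : (r + s) % R = r - (List.drop s col).length := by
      rw [Nat.mod_eq_sub_mod (by omega), Nat.mod_eq_of_lt (by omega)]
      simp [hlen]; omega
    rw [this]

-- invariant of the outer loop: after k columns, the result is the first k columns of B's answer
theorem pv_outer_fold (g : List (List Int)) (R C : Nat) (hR : R = g.length) (hR0 : 0 < R)
    (k : Nat) (hk : k ≤ C) :
    (List.range k).foldl (fun result c =>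
        let col := (List.range R).map (fun r => (g.getD r []).getD c 0)
        let s := c % R
        let shifted := col.drop s ++ col.take s
        (List.range R).foldl
          (fun res r => res.set r ((res.getD r []).set c (shifted.getD r 0))) result)
      (List.replicate R (List.replicate C (0 : Int)))
      = (List.range R).map (fun r => (List.range C).map
          (fun c => if c < k then (g.getD ((r + c) % R) []).getD c 0 else 0)) := by
  induction k with
  | zero =>
      simp only [List.range_zero, List.foldl_nil]
      apply List.ext_getElem
      · simp
      · intro i hi hi'
        simp only [List.getElem_replicate, List.getElem_map, List.getElem_range]
        apply List.ext_getElem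
        · simp
        · intro j hj hj'
          simp
  | succ m ih =>
      rw [List.range_succ, List.foldl_append, ih (by omega)]
      simp only [List.foldl_cons, List.foldl_nil]
      rw [pv_inner_fold R m _ _ R (le_refl R)]
      apply List.map_congr_left
      intro r hr
      rw [List.mem_range] at hr
      rw [if_pos hr, pv_set_map_range C m _ _ (by omega)]
      apply List.map_congr_left
      intro c hc
      rw [List.mem_range] at hc
      by_cases hcm : c = m
      · subst hcm
        rw [if_pos rfl, if_pos (by omega)]
        exact pv_shifted_getD g c R hR hR0 r hr
      · rw [if_neg hcm]
        by_cases h2 : c < m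
        · rw [if_pos h2, if_pos (by omega)]
        · rw [if_neg h2, if_neg (by omega)]

-- ===== VERDICT (by name: the statement is the Claim_ definition above) =====
theorem shift_by_col_py_spec : Claim_equal_shift_by_col_py := by
  intro g bg _ hpre
  obtain ⟨hne, -⟩ := hpre
  have hR0 : 0 < g.length := List.length_pos_iff.mpr hne
  unfold Spec_shift_by_col_py shift_by_col_py shift_by_col_py_alt
  simp only []
  rw [pv_outer_fold g g.length (g.headD []).length rfl hR0 _ (le_refl _)]
  apply List.map_congr_left
  intro r _
  apply List.map_congr_left
  intro c hc
  rw [List.mem_range] at hc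
  rw [if_pos hc]
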